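-- pv_equiv track=rewrite | github.com/KartikP/Burst-Reverberation-Toolbox-Example | functions/burst_reverberation_toolbox_v2.py | detect_reverberations_merge
-- ===== SOURCE A (Python) =====
-- def detect_reverberations_merge(burst_borders, burst_peaks, rmax):
--     sb_start = [burst_borders[0][0]]
--     sb_end = []
--     num_reverbs = []
--     r = 0
--     in_super_burst = False
--     for i in range(1,len(burst_borders)):
--         if (burst_borders[i][0]-burst_borders[i-1][1]) <= rmax:
--             if in_super_burst:
--                 r += 1
--             in_super_burst = True
--         elif (burst_borders[i][0]-burst_borders[i-1][1]) > rmax: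
--             if in_super_burst:
--                 r += 1
--             in_super_burst = False
--             sb_end.append(burst_borders[i-1][1])
--             sb_start.append(burst_borders[i][0])
--             num_reverbs.append(r)
--             r = 0
--         i += 1
--     i -= 1
--     if in_super_burst:
--         r +=1
--     sb_end.append(burst_borders[i][1])
--     num_reverbs.append(r)
--     return sb_start, sb_end, num_reverbs
-- ===== SOURCE B (Python) =====
-- def detect_reverberations_merge(burst_borders, burst_peaks, rmax):
--     segments = []
--     cur = [burst_borders[0]]
--     for prev, b in zip(burst_borders, burst_borders[1:]):
--         if b[0] - prev[1] > rmax: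
--             segments.append(cur)
--             cur = [b]
--         else:
--             cur.append(b)
--     segments.append(cur)
--     sb_start = [seg[0][0] for seg in segments]
--     sb_end = [seg[-1][1] for seg in segments]
--     num_reverbs = [len(seg) - 1 for seg in segments]
--     return sb_start, sb_end, num_reverbs
-- ===== Notes on version B (the rewrite author's own statement) =====
-- stated objective: alternative
-- what changed: B partitions the bursts into explicit gap-separated segment lists in one grouping pass and then reads sb_start/sb_end/num_reverbs off each segment (first start, last end, size-1) by three comprehensions, replacing A's in_super_burst flag and incrementally maintained reverberation counter emitted inline.
import Mathlib
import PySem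

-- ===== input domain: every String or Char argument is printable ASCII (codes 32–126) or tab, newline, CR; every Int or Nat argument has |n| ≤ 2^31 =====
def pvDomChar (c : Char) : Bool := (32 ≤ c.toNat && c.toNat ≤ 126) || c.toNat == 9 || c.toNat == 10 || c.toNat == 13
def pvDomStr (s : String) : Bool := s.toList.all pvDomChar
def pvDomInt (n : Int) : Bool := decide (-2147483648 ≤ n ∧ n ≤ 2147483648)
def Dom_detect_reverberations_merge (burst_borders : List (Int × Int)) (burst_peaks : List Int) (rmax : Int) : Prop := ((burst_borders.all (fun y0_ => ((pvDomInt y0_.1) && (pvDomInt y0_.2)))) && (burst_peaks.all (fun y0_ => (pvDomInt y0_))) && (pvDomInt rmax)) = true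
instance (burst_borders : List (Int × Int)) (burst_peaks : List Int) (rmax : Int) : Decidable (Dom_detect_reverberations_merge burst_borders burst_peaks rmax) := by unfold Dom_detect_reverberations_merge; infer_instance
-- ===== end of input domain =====

-- B replaces A's in_super_burst flag and incremental reverberation counter by an explicit
-- partition of the bursts into gap-separated segments followed by three per-segment reads
-- (objective: alternative decomposition; return value only, no side effects involved).

-- ===== PORT A =====
-- loop body of A's 'for i in range(1, len(burst_borders))'; state = (sb_start, sb_end, num_reverbs, r, in_super_burst)
def pvStepA (bb : List (Int × Int)) (rmax : Int)
    (s : List Int × List Int × List Int × Int × Bool) (i : Int) :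
    List Int × List Int × List Int × Int × Bool :=
  if (PySem.List.pyGetD bb i (0, 0)).1 - (PySem.List.pyGetD bb (i - 1) (0, 0)).2 ≤ rmax then
    (s.1, s.2.1, s.2.2.1, (if s.2.2.2.2 then s.2.2.2.1 + 1 else s.2.2.2.1), true)
  else if (PySem.List.pyGetD bb i (0, 0)).1 - (PySem.List.pyGetD bb (i - 1) (0, 0)).2 > rmax then
    (s.1 ++ [(PySem.List.pyGetD bb i (0, 0)).1],
     s.2.1 ++ [(PySem.List.pyGetD bb (i - 1) (0, 0)).2],
     s.2.2.1 ++ [if s.2.2.2.2 then s.2.2.2.1 + 1 else s.2.2.2.1], 0, false)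
  else s

def detect_reverberations_merge (burst_borders : List (Int × Int)) (burst_peaks : List Int) (rmax : Int) : List Int × List Int × List Int :=
  let st :=
    (PySem.List.pyRange 1 (burst_borders.length : Int) 1).foldl (pvStepA burst_borders rmax)
      ([(PySem.List.pyGetD burst_borders 0 (0, 0)).1], [], [], 0, false)
  -- after the loop: i = len - 1 (Pre_ guarantees the loop ran, so i is defined)
  let i : Int := (burst_borders.length : Int) - 1
  let r : Int := if st.2.2.2.2 then st.2.2.2.1 + 1 else st.2.2.2.1
  (st.1, st.2.1 ++ [(PySem.List.pyGetD burst_borders i (0, 0)).2], st.2.2.1 ++ [r])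

-- ===== PORT B =====
-- loop body of B's grouping pass; state = (finished segments, current segment)
def pvStepB (rmax : Int)
    (s : List (List (Int × Int)) × List (Int × Int)) (pb : (Int × Int) × (Int × Int)) :
    List (List (Int × Int)) × List (Int × Int) :=
  if pb.2.1 - pb.1.2 > rmax then (s.1 ++ [s.2], [pb.2]) else (s.1, s.2 ++ [pb.2])

def detect_reverberations_merge_alt (burst_borders : List (Int × Int)) (burst_peaks : List Int) (rmax : Int) : List Int × List Int × List Int :=
  let st :=
    (burst_borders.zip (PySem.List.slice burst_borders (some 1) none)).foldl (pvStepB rmax)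
      ([], [PySem.List.pyGetD burst_borders 0 (0, 0)])
  let segments := st.1 ++ [st.2]
  (segments.map (fun s => (PySem.List.pyGetD s 0 (0, 0)).1),
   segments.map (fun s => (PySem.List.pyGetD s (-1) (0, 0)).2),
   segments.map (fun s => (s.length : Int) - 1))

-- ===== PRECONDITION & SPEC =====
-- Pre_ excludes exactly the inputs on which Python A raises: empty burst_borders (IndexError on
-- burst_borders[0]) and a single burst (UnboundLocalError: the loop never runs and i is unbound).
def Pre_detect_reverberations_merge (burst_borders : List (Int × Int)) (burst_peaks : List Int) (rmax : Int) : Prop :=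
  2 ≤ burst_borders.length
instance (burst_borders : List (Int × Int)) (burst_peaks : List Int) (rmax : Int) : Decidable (Pre_detect_reverberations_merge burst_borders burst_peaks rmax) := by unfold Pre_detect_reverberations_merge; infer_instance

def pvWitness_detect_reverberations_merge : (List (Int × Int)) × List Int × Int := ([(0, 3), (10, 12)], [], 2)

def Spec_detect_reverberations_merge (burst_borders : List (Int × Int)) (burst_peaks : List Int) (rmax : Int) (out : List Int × List Int × List Int) : Prop := out = detect_reverberations_merge_alt burst_borders burst_peaks rmax
instance (burst_borders : List (Int × Int)) (burst_peaks : List Int) (rmax : Int) (out : List Int × List Int × List Int) : Decidable (Spec_detect_reverberations_merge burst_borders burst_peaks rmax out) := by unfold Spec_detect_reverberations_merge; infer_instance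

-- ===== CLAIM (what is proved, stated in full; the proofs are below) =====
def Claim_equal_detect_reverberations_merge : Prop := ∀ (burst_borders : List (Int × Int)) (burst_peaks : List Int) (rmax : Int), Dom_detect_reverberations_merge burst_borders burst_peaks rmax → Pre_detect_reverberations_merge burst_borders burst_peaks rmax → Spec_detect_reverberations_merge burst_borders burst_peaks rmax (detect_reverberations_merge burst_borders burst_peaks rmax)


-- ===== LEMMAS AND PROOFS =====

-- canonical recursive segmentation both ports are reduced to:
-- pvSeg rmax a r tl = (starts of the later segments, ends of all segments, reverb counts of all
-- segments), where a is the last burst merged so far and r the reverb count accumulated so far.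
def pvSeg (rmax : Int) (a : Int × Int) (r : Int) : List (Int × Int) → List Int × List Int × List Int
  | [] => ([], [a.2], [r])
  | b :: tl =>
    if b.1 - a.2 ≤ rmax then pvSeg rmax b (r + 1) tl
    else
      let t := pvSeg rmax b 0 tl
      (b.1 :: t.1, a.2 :: t.2.1, r :: t.2.2)

lemma pv_getD_of_drop_cons {bb tl : List (Int × Int)} {k : Nat} {a : Int × Int}
    (h : bb.drop k = a :: tl) : bb.getD k (0, 0) = a := by
  have h0 : bb[k]? = some a := by
    have h' : (List.drop k bb)[0]? = bb[k + 0]? := List.getElem?_drop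
    rw [h] at h'
    simpa using h'.symm
  simp [List.getD_eq_getElem?_getD, h0]

lemma pvA_fold (rmax : Int) (bb : List (Int × Int)) :
    ∀ (tl : List (Int × Int)) (k : Nat) (a : Int × Int) (ss se nr : List Int) (r : Int) (isb : Bool),
    bb.drop k = a :: tl →
    (let st := (PySem.List.pyRange ((k : Int) + 1) (bb.length : Int) 1).foldl (pvStepA bb rmax) (ss, se, nr, r, isb)
     (st.1, st.2.1 ++ [(PySem.List.pyGetD bb ((bb.length : Int) - 1) (0, 0)).2],
      st.2.2.1 ++ [if st.2.2.2.2 then st.2.2.2.1 + 1 else st.2.2.2.1]))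
    = (let t := pvSeg rmax a (if isb then r + 1 else r) tl
       (ss ++ t.1, se ++ t.2.1, nr ++ t.2.2)) := by
  intro tl
  induction tl with
  | nil =>
      intro k a ss se nr r isb h
      have hk : k < bb.length := by
        by_contra hge
        simp [List.drop_eq_nil_of_le (Nat.le_of_not_lt hge)] at h
      have hlen : bb.length = k + 1 := by
        have := congrArg List.length h
        simp at this
        omega
      have hnil : PySem.List.pyRange ((k : Int) + 1) (bb.length : Int) 1 = [] := by
        apply PySem.List.pyRange_one_eq_nil
        omega
      have hidx : ((bb.length : Int) - 1) = ((k : Nat) : Int) := by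
        omega
      have hget : PySem.List.pyGetD bb ((bb.length : Int) - 1) (0, 0) = a := by
        rw [hidx, PySem.List.pyGetD_natCast, pv_getD_of_drop_cons h]
      simp [hnil, hget, pvSeg]
  | cons b tl2 ih =>
      intro k a ss se nr r isb h
      have h2 : bb.drop (k + 1) = b :: tl2 := by
        have : List.drop 1 (bb.drop k) = List.drop 1 (a :: b :: tl2) := by rw [h]
        simpa [List.drop_drop, Nat.add_comm] using this
      have hlen : k + 1 < bb.length := by
        have := congrArg List.length h2
        simp at this
        omega
      have hcons : PySem.List.pyRange ((k : Int) + 1) (bb.length : Int) 1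
          = ((k : Int) + 1) :: PySem.List.pyRange (((k : Int) + 1) + 1) (bb.length : Int) 1 := by
        apply PySem.List.pyRange_one_cons
        omega
      have hga : PySem.List.pyGetD bb (((k : Int) + 1) - 1) (0, 0) = a := by
        have : ((k : Int) + 1 - 1) = ((k : Nat) : Int) := by ring
        rw [this, PySem.List.pyGetD_natCast, pv_getD_of_drop_cons h]
      have hgb : PySem.List.pyGetD bb ((k : Int) + 1) (0, 0) = b := by
        have : ((k : Int) + 1) = (((k + 1 : Nat)) : Int) := by push_cast; ring
        rw [this, PySem.List.pyGetD_natCast, pv_getD_of_drop_cons h2]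
      rw [hcons]
      simp only [List.foldl_cons]
      by_cases hle : b.1 - a.2 ≤ rmax
      · have hstep : pvStepA bb rmax (ss, se, nr, r, isb) ((k : Int) + 1)
            = (ss, se, nr, (if isb then r + 1 else r), true) := by
          unfold pvStepA
          rw [hga, hgb]
          simp [hle]
        rw [hstep]
        have := ih (k + 1) b ss se nr (if isb then r + 1 else r) true h2
        push_cast at this
        rw [this]
        simp [pvSeg, hle]
      · have hgt : b.1 - a.2 > rmax := by omega
        have hstep : pvStepA bb rmax (ss, se, nr, r, isb) ((k : Int) + 1)
            = (ss ++ [b.1], se ++ [a.2], nr ++ [if isb then r + 1 else r], 0, false) := by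
          unfold pvStepA
          rw [hga, hgb]
          simp [hle, hgt]
        rw [hstep]
        have := ih (k + 1) b (ss ++ [b.1]) (se ++ [a.2]) (nr ++ [if isb then r + 1 else r]) 0 false h2
        push_cast at this
        rw [this]
        simp [pvSeg, hle]

lemma pv_getD_zero_append {cur : List (Int × Int)} (b : Int × Int) (h : cur ≠ []) :
    (cur ++ [b]).getD 0 (0, 0) = cur.getD 0 (0, 0) := by
  cases cur with
  | nil => exact absurd rfl h
  | cons x xs => rfl

lemma pvB_fold (rmax : Int) :
    ∀ (tl : List (Int × Int)) (a : Int × Int) (done : List (List (Int × Int)))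
      (cur : List (Int × Int)) (hcur : cur ≠ []) (_ : cur.getLast hcur = a),
    (let st := ((a :: tl).zip tl).foldl (pvStepB rmax) (done, cur)
     let segments := st.1 ++ [st.2]
     (segments.map (fun s => (PySem.List.pyGetD s 0 (0, 0)).1),
      segments.map (fun s => (PySem.List.pyGetD s (-1) (0, 0)).2),
      segments.map (fun s => (s.length : Int) - 1)))
    = (let t := pvSeg rmax a ((cur.length : Int) - 1) tl
       (done.map (fun s => (PySem.List.pyGetD s 0 (0, 0)).1) ++ ((PySem.List.pyGetD cur 0 (0, 0)).1 :: t.1),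
        done.map (fun s => (PySem.List.pyGetD s (-1) (0, 0)).2) ++ t.2.1,
        done.map (fun s => (s.length : Int) - 1) ++ t.2.2)) := by
  intro tl
  induction tl with
  | nil =>
      intro a done cur hcur hlast
      simp [pvSeg, PySem.List.pyGetD_neg_one cur (0, 0) hcur, hlast]
  | cons b tl2 ih =>
      intro a done cur hcur hlast
      simp only [List.zip_cons_cons, List.foldl_cons]
      by_cases hgt : b.1 - a.2 > rmax
      · have hstep : pvStepB rmax (done, cur) (a, b) = (done ++ [cur], [b]) := by
          simp [pvStepB, hgt]
        rw [hstep]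
        have := ih b (done ++ [cur]) [b] (by simp) (by simp)
        simp only at this
        rw [this]
        have hle : ¬ (b.1 - a.2 ≤ rmax) := by omega
        simp [pvSeg, hle, PySem.List.pyGetD_neg_one cur (0, 0) hcur, hlast, PySem.List.pyGetD_zero]
      · have hstep : pvStepB rmax (done, cur) (a, b) = (done, cur ++ [b]) := by
          simp [pvStepB, hgt]
        rw [hstep]
        have := ih b done (cur ++ [b]) (by simp) (by simp)
        simp only at this
        rw [this]
        have hle : b.1 - a.2 ≤ rmax := by omega
        have hl1 : (((cur ++ [b]).length : Int) - 1) = ((cur.length : Int) - 1) + 1 := by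
          simp only [List.length_append, List.length_cons, List.length_nil]
          push_cast
          ring
        simp only [pvSeg, hle, if_pos, hl1, PySem.List.pyGetD_zero]
        rw [pv_getD_zero_append b hcur]

-- ===== VERDICT (by name: the statement is the Claim_ definition above) =====
theorem detect_reverberations_merge_spec : Claim_equal_detect_reverberations_merge := by
  intro bb bp rmax _ hpre
  unfold Spec_detect_reverberations_merge
  unfold Pre_detect_reverberations_merge at hpre
  match bb, hpre with
  | x :: tl, _ =>
    have hA := pvA_fold rmax (x :: tl) tl 0 x [x.1] [] [] 0 false (by simp)
    have hB := pvB_fold rmax tl x [] [x] (by simp) (by simp)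
    simp only at hA hB
    show (let st := (PySem.List.pyRange 1 ((x :: tl).length : Int) 1).foldl (pvStepA (x :: tl) rmax)
            ([(PySem.List.pyGetD (x :: tl) 0 (0, 0)).1], [], [], 0, false)
          (st.1, st.2.1 ++ [(PySem.List.pyGetD (x :: tl) (((x :: tl).length : Int) - 1) (0, 0)).2],
           st.2.2.1 ++ [if st.2.2.2.2 then st.2.2.2.1 + 1 else st.2.2.2.1]))
        = detect_reverberations_merge_alt (x :: tl) bp rmax
    unfold detect_reverberations_merge_alt
    rw [PySem.List.slice_from_one]
    simp only [List.tail_cons, PySem.List.pyGetD_zero_cons]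
    have h1 : ((0 : Nat) : Int) + 1 = 1 := by norm_num
    rw [h1] at hA
    rw [hA, hB]
    simp
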